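-- pv_equiv track=rewrite | github.com/viking-sudo-rm/dfa-extractor | languages.py | trace_acceptance
-- ===== SOURCE A (Python) =====
-- def trace_acceptance(string):
--     state = 1
--     states = []
--     for token in string:
--         states.append(state)
--         if token == "b":
--             state = 0
--     states.append(state)
--     return states
-- ===== SOURCE B (Python) =====
-- def trace_acceptance(string):
--     tokens = list(string)
--     n = len(tokens)
--     try:
--         k = tokens.index("b")
--     except ValueError:
--         k = n
--     return [1] * (k + 1) + [0] * (n - k)
-- ===== Notes on version B (the rewrite author's own statement) =====
-- stated objective: simpler
-- what changed: Replaces the per-token state-simulation loop with a single first-'b' index lookup and a closed-form list construction [1]*(k+1)+[0]*(n-k).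
import Mathlib
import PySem

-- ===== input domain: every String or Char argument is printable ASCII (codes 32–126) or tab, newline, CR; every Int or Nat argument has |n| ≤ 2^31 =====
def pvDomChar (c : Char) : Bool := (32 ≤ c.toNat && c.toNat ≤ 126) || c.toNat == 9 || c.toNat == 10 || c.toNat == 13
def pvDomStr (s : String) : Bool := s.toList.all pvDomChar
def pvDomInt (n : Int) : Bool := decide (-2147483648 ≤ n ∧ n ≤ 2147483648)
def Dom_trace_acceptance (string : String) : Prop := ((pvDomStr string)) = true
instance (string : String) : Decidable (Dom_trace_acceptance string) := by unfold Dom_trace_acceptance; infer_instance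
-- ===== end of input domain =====

-- B replaces A's per-token state-simulation loop with a first-'b' index lookup and a closed-form list construction (objective: simpler).


-- ===== PORT A =====
-- the loop body: append the current state, then set state to 0 on 'b'
def pvStepA (acc : Int × List Int) (token : Char) : Int × List Int :=
  ((if token == 'b' then 0 else acc.1), acc.2 ++ [acc.1])

def trace_acceptance (string : String) : List Int :=
  let r := string.toList.foldl pvStepA (1, [])
  r.2 ++ [r.1]

-- ===== PORT B =====
def trace_acceptance_alt (string : String) : List Int :=
  let tokens := string.toList
  let n := tokens.length
  let k := match PySem.List.index? tokens 'b' with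
    | some k => k
    | none => n
  List.replicate (k + 1) 1 ++ List.replicate (n - k) 0

-- ===== PRECONDITION & SPEC =====
def Spec_trace_acceptance (string : String) (out : List Int) : Prop := out = trace_acceptance_alt string
instance (string : String) (out : List Int) : Decidable (Spec_trace_acceptance string out) := by unfold Spec_trace_acceptance; infer_instance

-- ===== CLAIM (what is proved, stated in full; the proofs are below) =====
def Claim_equal_trace_acceptance : Prop := ∀ (string : String), Dom_trace_acceptance string → Spec_trace_acceptance string (trace_acceptance string)

-- ===== LEMMAS AND PROOFS =====
-- B's closed form, on the character list
def pvAltList (l : List Char) : List Int :=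
  let k := match PySem.List.index? l 'b' with
    | some k => k
    | none => l.length
  List.replicate (k + 1) 1 ++ List.replicate (l.length - k) 0

theorem pvFoldA_zero (l : List Char) (acc : List Int) :
    l.foldl pvStepA (0, acc) = (0, acc ++ List.replicate l.length 0) := by
  induction l generalizing acc with
  | nil => simp
  | cons c l ih =>
    simp only [List.foldl_cons, pvStepA]
    split
    · rw [ih]; simp [List.replicate_succ]
    · rw [ih]; simp [List.replicate_succ]

theorem pvFoldA_one (l : List Char) (acc : List Int) :
    (let r := l.foldl pvStepA (1, acc); r.2 ++ [r.1]) = acc ++ pvAltList l := by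
  induction l generalizing acc with
  | nil => simp [pvAltList, PySem.List.index?]
  | cons c l ih =>
    by_cases hc : c = 'b'
    · subst hc
      simp only [List.foldl_cons, pvStepA, beq_self_eq_true, if_true]
      rw [pvFoldA_zero]
      simp only [pvAltList, PySem.List.index?_cons_self]
      simp [List.replicate_succ']
    · simp only [List.foldl_cons, pvStepA, beq_iff_eq, if_neg hc]
      rw [ih]
      have hidx := PySem.List.index?_cons_of_ne (x := c) (xs := l) (v := 'b') hc
      simp only [pvAltList, hidx]
      cases h : PySem.List.index? l 'b' with
      | none => simp [List.replicate_succ, List.append_assoc]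
      | some k =>
        have ⟨hk, _, _⟩ := PySem.List.getElem_of_index?_eq_some h
        simp [List.replicate_succ, List.append_assoc]

-- ===== VERDICT (by name: the statement is the Claim_ definition above) =====
theorem trace_acceptance_spec : Claim_equal_trace_acceptance := by
  intro s _
  show trace_acceptance s = trace_acceptance_alt s
  have := pvFoldA_one s.toList []
  simpa [trace_acceptance, trace_acceptance_alt, pvAltList] using this
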